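-- pv_equiv track=rewrite | github.com/jumaluwati/Compliance_Checker | compliance.py | parse_templates
-- ===== SOURCE A (Python) =====
-- def parse_templates(config):
--     templates = {}
--     current_template = None
--
--     for line in config.splitlines():
--         line = line.strip()
--         if line.startswith("template"):
--             current_template = line
--             templates[current_template] = set()
--         elif current_template and line:
--             templates[current_template].add(line)
--
--     return templates
-- ===== SOURCE B (Python) =====
-- def _sections(lines):
--     # skip any lines before the first template header
--     while lines and not lines[0].startswith("template"):
--         lines = lines[1:]
--     if not lines:
--         return []
--     body, rest = [], lines[1:]
--     while rest and not rest[0].startswith("template"):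
--         if rest[0]:
--             body.append(rest[0])
--         rest = rest[1:]
--     return [(lines[0], body)] + _sections(rest)
--
--
-- def parse_templates(config):
--     lines = [ln.strip() for ln in config.splitlines()]
--     templates = {}
--     for header, body in _sections(lines):
--         templates[header] = set(body)
--     return templates
-- ===== Notes on version B (the rewrite author's own statement) =====
-- stated objective: alternative
-- what changed: Replaces A's single stateful line loop (dict + current_template running state) with a two-phase group-then-map shape: first partition the stripped lines into (header, body) sections, then build the dict by assigning set(body) per section in order.
import Mathlib
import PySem

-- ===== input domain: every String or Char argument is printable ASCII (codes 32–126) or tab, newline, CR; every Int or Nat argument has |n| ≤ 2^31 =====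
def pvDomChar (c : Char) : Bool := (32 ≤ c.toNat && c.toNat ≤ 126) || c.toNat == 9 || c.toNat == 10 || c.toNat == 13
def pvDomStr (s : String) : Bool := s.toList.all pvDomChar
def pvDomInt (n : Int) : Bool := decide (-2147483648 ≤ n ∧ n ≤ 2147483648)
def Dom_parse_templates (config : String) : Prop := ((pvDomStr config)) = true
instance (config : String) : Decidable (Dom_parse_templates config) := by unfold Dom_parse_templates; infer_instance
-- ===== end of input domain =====

-- B replaces A's running-state line loop by a two-phase group-then-map decomposition
-- (partition the stripped lines into header/body sections, then build the dict);
-- objective: alternative structure, same cost.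

-- shared literal test: line.startswith("template")
def pvIsHdr (line : String) : Bool := PySem.Str.startswith line "template"

-- ===== PORT A =====
-- loop body of A's for-line loop: state = (templates dict, current_template)
def pvStepA (st : PySem.Dict String (PySem.Set String) × Option String) (raw : String) :
    PySem.Dict String (PySem.Set String) × Option String :=
  let line := PySem.Str.strip raw
  if pvIsHdr line then
    (st.1.insert line PySem.Set.empty, some line)
  else
    match st.2 with
    | some cur => if line ≠ "" then (st.1.modify cur [] (fun s => PySem.Set.add s line), st.2) else st
    | none => st

def parse_templates (config : String) : List (String × List String) :=
  ((PySem.Str.splitlines config).foldl pvStepA (PySem.Dict.empty, none)).1.items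

-- ===== PORT B =====
-- inner while of _sections: collect the non-empty lines before the next header, return (body, rest)
def pvSpanBody (body : List String) : List String → List String × List String
  | [] => (body, [])
  | l :: ls =>
    if pvIsHdr l then (body, l :: ls)
    else pvSpanBody (if l ≠ "" then body ++ [l] else body) ls

-- termination measure for pvSections (the rest returned by pvSpanBody is a suffix)
theorem pvSpanBody_len (ls : List String) : ∀ body, (pvSpanBody body ls).2.length ≤ ls.length := by
  induction ls with
  | nil => intro body; simp [pvSpanBody]
  | cons l ls ih =>
    intro body
    simp only [pvSpanBody]
    split
    · simp
    · exact Nat.le_succ_of_le (ih _)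

-- _sections: skip lines before the first header, then split section by section
def pvSections : List String → List (String × List String)
  | [] => []
  | l :: ls =>
    if pvIsHdr l then
      (l, (pvSpanBody [] ls).1) :: pvSections (pvSpanBody [] ls).2
    else
      pvSections ls
termination_by ls => ls.length
decreasing_by
  · exact Nat.lt_succ_of_le (pvSpanBody_len ls [])
  · exact Nat.lt_succ_of_le (Nat.le_refl _)

-- loop body of B's final for-loop: templates[header] = set(body)
def pvIns (d : PySem.Dict String (PySem.Set String)) (p : String × List String) :
    PySem.Dict String (PySem.Set String) :=
  d.insert p.1 (PySem.Set.ofList p.2)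

def parse_templates_alt (config : String) : List (String × List String) :=
  let lines := (PySem.Str.splitlines config).map PySem.Str.strip
  ((pvSections lines).foldl pvIns PySem.Dict.empty).items

-- ===== PRECONDITION & SPEC =====
def Spec_parse_templates (config : String) (out : List (String × List String)) : Prop := out = parse_templates_alt config
instance (config : String) (out : List (String × List String)) : Decidable (Spec_parse_templates config out) := by unfold Spec_parse_templates; infer_instance

-- ===== CLAIM (what is proved, stated in full; the proofs are below) =====
def Claim_equal_parse_templates : Prop := ∀ (config : String), Dom_parse_templates config → Spec_parse_templates config (parse_templates config)

-- ===== LEMMAS AND PROOFS =====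

-- A's loop body on an already-stripped line
def pvStep (st : PySem.Dict String (PySem.Set String) × Option String) (line : String) :
    PySem.Dict String (PySem.Set String) × Option String :=
  if pvIsHdr line then
    (st.1.insert line PySem.Set.empty, some line)
  else
    match st.2 with
    | some cur => if line ≠ "" then (st.1.modify cur [] (fun s => PySem.Set.add s line), st.2) else st
    | none => st

-- within one section, A's fold extends the current header's set exactly by pvSpanBody's body
theorem pvBody (ls : List String) :
    ∀ (body : List String) (h : String) (s : PySem.Set String)
      (d : PySem.Dict String (PySem.Set String)),
    List.foldl pvStep (d.insert h (PySem.Set.update s body), some h) ls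
      = List.foldl pvStep (d.insert h (PySem.Set.update s (pvSpanBody body ls).1), some h)
          (pvSpanBody body ls).2 := by
  induction ls with
  | nil => intro body h s d; simp [pvSpanBody]
  | cons l ls ih =>
    intro body h s d
    simp only [pvSpanBody]
    by_cases hl : pvIsHdr l
    · simp [hl]
    · simp only [hl, Bool.false_eq_true, if_false, List.foldl_cons]
      by_cases hne : l = ""
      · have hstep :
            pvStep (d.insert h (PySem.Set.update s body), some h) l
              = (d.insert h (PySem.Set.update s body), some h) := by
          subst hne; simp [pvStep, hl]
        rw [hstep, ih body h s d]
        simp [hne]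
      · have hstep :
            pvStep (d.insert h (PySem.Set.update s body), some h) l
              = (d.insert h (PySem.Set.update s (body ++ [l])), some h) := by
          simp [pvStep, hl, hne, PySem.Dict.modify, PySem.Dict.getD_insert_self,
            PySem.Dict.insert_insert_self, PySem.Set.update_append, PySem.Set.update_cons,
            PySem.Set.update_nil]
        rw [hstep, ih (body ++ [l]) h s d]
        simp [hne]

-- the rest returned by pvSpanBody is empty or begins with a header
theorem pvRest (ls : List String) :
    ∀ body, (pvSpanBody body ls).2 = [] ∨
      ∃ l' r', (pvSpanBody body ls).2 = l' :: r' ∧ pvIsHdr l' := by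
  induction ls with
  | nil => intro body; left; simp [pvSpanBody]
  | cons l ls ih =>
    intro body
    simp only [pvSpanBody]
    by_cases hl : pvIsHdr l
    · right; exact ⟨l, ls, by simp [hl], hl⟩
    · simpa [hl] using ih _

-- from a header (or the end), the dict part does not depend on the remembered current_template
theorem pvDrop (r : List String)
    (hr : r = [] ∨ ∃ l' r', r = l' :: r' ∧ pvIsHdr l')
    (d : PySem.Dict String (PySem.Set String)) (h : String) :
    (List.foldl pvStep (d, some h) r).1 = (List.foldl pvStep (d, none) r).1 := by
  rcases hr with rfl | ⟨l', r', rfl, hl⟩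
  · rfl
  · simp [pvStep, hl]

-- main invariant: A's fold from (d, None) equals B's per-section dict build
theorem pvMain (n : Nat) : ∀ (ls : List String), ls.length ≤ n →
    ∀ d : PySem.Dict String (PySem.Set String),
    (List.foldl pvStep (d, (none : Option String)) ls).1 = (pvSections ls).foldl pvIns d := by
  induction n with
  | zero =>
    intro ls hn d
    have : ls = [] := List.eq_nil_of_length_eq_zero (Nat.le_zero.mp hn)
    subst this; simp [pvSections]
  | succ n ih =>
    intro ls hn d
    cases ls with
    | nil => simp [pvSections]
    | cons l ls =>
      by_cases hl : pvIsHdr l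
      · have h1 : pvStep (d, (none : Option String)) l
            = (d.insert l PySem.Set.empty, some l) := by simp [pvStep, hl]
        have h2 := pvBody ls [] l PySem.Set.empty d
        have hupd : PySem.Set.update PySem.Set.empty ([] : List String) = PySem.Set.empty := rfl
        rw [hupd] at h2
        have h3 := pvDrop (pvSpanBody [] ls).2 (pvRest ls [])
          (d.insert l (PySem.Set.update PySem.Set.empty (pvSpanBody [] ls).1)) l
        have hlen : (pvSpanBody [] ls).2.length ≤ n :=
          le_trans (pvSpanBody_len ls []) (Nat.le_of_succ_le_succ hn)
        calc (List.foldl pvStep (d, (none : Option String)) (l :: ls)).1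
            = (List.foldl pvStep (d.insert l PySem.Set.empty, some l) ls).1 := by
              rw [List.foldl_cons, h1]
          _ = (List.foldl pvStep
                (d.insert l (PySem.Set.update PySem.Set.empty (pvSpanBody [] ls).1), none)
                (pvSpanBody [] ls).2).1 := by rw [h2]; exact h3
          _ = (pvSections (pvSpanBody [] ls).2).foldl pvIns
                (d.insert l (PySem.Set.update PySem.Set.empty (pvSpanBody [] ls).1)) :=
              ih _ hlen _
          _ = (pvSections (l :: ls)).foldl pvIns d := by
              rw [pvSections]
              simp only [hl, if_true, List.foldl_cons]
              rfl
      · have h1 : pvStep (d, (none : Option String)) l = (d, none) := by simp [pvStep, hl]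
        have hsec : (pvSections (l :: ls)) = pvSections ls := by rw [pvSections]; simp [hl]
        rw [hsec, List.foldl_cons, h1]
        exact ih ls (Nat.le_of_succ_le_succ hn) d

-- ===== VERDICT (by name: the statement is the Claim_ definition above) =====
theorem parse_templates_spec : Claim_equal_parse_templates := by
  intro config _
  unfold Spec_parse_templates parse_templates parse_templates_alt
  have hA : pvStepA = fun st raw => pvStep st (PySem.Str.strip raw) := rfl
  rw [hA, ← List.foldl_map,
    pvMain ((PySem.Str.splitlines config).map PySem.Str.strip).length _ (Nat.le_refl _)]
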